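-- pv_equiv track=rewrite | github.com/minstonnguyen/cmpe188-hw3 | train_evaluate.py | extract_query_tail
-- ===== SOURCE A (Python) =====
-- def extract_query_tail(text: str) -> str:
--     """Final instruction line only — drops shared 'Alice' framing and worked examples."""
--     lines = [
--         ln.strip()
--         for ln in str(text).splitlines()
--         if ln.strip().lower().startswith("now,")
--     ]
--     if lines:
--         return lines[-1]
--     for ln in reversed(str(text).splitlines()):
--         s = ln.strip()
--         if s:
--             return s
--     return str(text).strip()
-- ===== SOURCE B (Python) =====
-- def extract_query_tail(text: str) -> str:
--     """Final instruction line only — drops shared 'Alice' framing and worked examples."""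
--     fallback = None
--     for ln in reversed(str(text).splitlines()):
--         s = ln.strip()
--         if s.lower().startswith("now,"):
--             return s
--         if s and fallback is None:
--             fallback = s
--     return fallback if fallback is not None else str(text).strip()
-- ===== Notes on version B (the rewrite author's own statement) =====
-- stated objective: alternative
-- what changed: A builds the full list of prefix-matching instruction lines and, when it is empty, does a second reverse scan for a non-empty line; B makes a single reverse pass with early exit on the first (reverse) prefix match while remembering the first non-empty line as fallback.
import Mathlib
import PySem

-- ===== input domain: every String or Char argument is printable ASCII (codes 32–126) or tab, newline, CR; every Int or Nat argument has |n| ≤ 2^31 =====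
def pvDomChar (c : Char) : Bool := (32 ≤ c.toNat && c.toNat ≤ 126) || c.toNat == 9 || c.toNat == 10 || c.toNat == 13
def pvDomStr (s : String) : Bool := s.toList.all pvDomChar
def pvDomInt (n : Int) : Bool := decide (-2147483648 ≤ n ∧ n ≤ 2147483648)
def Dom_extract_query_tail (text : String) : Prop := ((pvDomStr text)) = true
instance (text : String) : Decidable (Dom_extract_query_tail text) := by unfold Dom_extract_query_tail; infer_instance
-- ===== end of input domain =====

-- B fuses A's filter-then-last comprehension and its separate reverse fallback scan into one
-- reverse pass with early exit (objective: alternative decomposition, same asymptotic cost).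

-- ===== PORT A =====
-- A's second loop: 'for ln in reversed(...): s = ln.strip(); if s: return s' then 'return str(text).strip()'
def pvAFallback (text : String) : List String → String
  | [] => PySem.Str.strip text
  | ln :: rest =>
      let s := PySem.Str.strip ln
      if s ≠ "" then s else pvAFallback text rest

def extract_query_tail (text : String) : String :=
  let lines := ((PySem.Str.splitlines text).filter
      (fun ln => PySem.Str.startswith (PySem.Str.lower (PySem.Str.strip ln)) "now,")).map PySem.Str.strip
  if lines ≠ [] then lines.getLast!   -- lines[-1] on a nonempty list
  else pvAFallback text (PySem.Str.splitlines text).reverse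

-- ===== PORT B =====
-- B's single reverse loop with fallback accumulator
def pvBLoop (text : String) : List String → Option String → String
  | [], fb => match fb with | some f => f | none => PySem.Str.strip text
  | ln :: rest, fb =>
      let s := PySem.Str.strip ln
      if PySem.Str.startswith (PySem.Str.lower s) "now," then s
      else pvBLoop text rest (if s ≠ "" ∧ fb = none then some s else fb)

def extract_query_tail_alt (text : String) : String :=
  pvBLoop text (PySem.Str.splitlines text).reverse none

-- ===== PRECONDITION & SPEC =====
def Spec_extract_query_tail (text : String) (out : String) : Prop := out = extract_query_tail_alt text
instance (text : String) (out : String) : Decidable (Spec_extract_query_tail text out) := by unfold Spec_extract_query_tail; infer_instance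

-- ===== CLAIM (what is proved, stated in full; the proofs are below) =====
def Claim_equal_extract_query_tail : Prop := ∀ (text : String), Dom_extract_query_tail text → Spec_extract_query_tail text (extract_query_tail text)

-- ===== LEMMAS AND PROOFS =====

-- What pvBLoop computes, stated declaratively over its list argument
def pvSpecVal (text : String) (L : List String) (fb : Option String) : String :=
  match (L.filter (fun ln => PySem.Str.startswith (PySem.Str.lower (PySem.Str.strip ln)) "now,")).head? with
  | some ln => PySem.Str.strip ln
  | none =>
    match fb with
    | some f => f
    | none =>
      match L.find? (fun ln => PySem.Str.strip ln != "") with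
      | some ln => PySem.Str.strip ln
      | none => PySem.Str.strip text

theorem pvBLoop_eq (text : String) (L : List String) (fb : Option String) :
    pvBLoop text L fb = pvSpecVal text L fb := by
  induction L generalizing fb with
  | nil => cases fb <;> rfl
  | cons ln rest ih =>
    simp only [pvBLoop, pvSpecVal, List.filter_cons, List.find?_cons]
    by_cases hp : PySem.Str.startswith (PySem.Str.lower (PySem.Str.strip ln)) "now," = true
    · rw [if_pos hp, if_pos hp, List.head?_cons]
    · rw [if_neg hp, if_neg hp, ih]
      by_cases hs : PySem.Str.strip ln = ""
      · have hb : (PySem.Str.strip ln != "") = false := by simp [hs]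
        rw [hb]
        simp only [pvSpecVal, if_neg (by simp [hs] : ¬ (PySem.Str.strip ln ≠ "" ∧ fb = none))]
      · have hb : (PySem.Str.strip ln != "") = true := by simp [hs]
        rw [hb]
        cases fb with
        | some f => simp only [pvSpecVal, if_neg (by simp : ¬ (PySem.Str.strip ln ≠ "" ∧ (some f : Option String) = none))]
        | none =>
          rw [if_pos (show PySem.Str.strip ln ≠ "" ∧ (none : Option String) = none from ⟨hs, rfl⟩)]
          simp only [pvSpecVal]

theorem pvAFallback_eq (text : String) (L : List String) :
    pvAFallback text L =
      match L.find? (fun ln => PySem.Str.strip ln != "") with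
      | some ln => PySem.Str.strip ln
      | none => PySem.Str.strip text := by
  induction L with
  | nil => rfl
  | cons ln rest ih =>
    by_cases hs : PySem.Str.strip ln = "" <;>
      simp [pvAFallback, hs, ih]

theorem pvGetLast_bang (x : String) (xs : List String) :
    (x :: xs).getLast! = (x :: xs).getLast (by simp) := by
  simp [List.getLast!]

-- ===== VERDICT (by name: the statement is the Claim_ definition above) =====
theorem extract_query_tail_spec : Claim_equal_extract_query_tail := by
  intro text _
  unfold Spec_extract_query_tail extract_query_tail extract_query_tail_alt
  rw [pvBLoop_eq]
  unfold pvSpecVal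
  rw [List.filter_reverse, List.head?_reverse]
  cases hF : (PySem.Str.splitlines text).filter
      (fun ln => PySem.Str.startswith (PySem.Str.lower (PySem.Str.strip ln)) "now,") with
  | nil => simp [pvAFallback_eq]
  | cons a as =>
    show (if (List.map PySem.Str.strip (a :: as)) ≠ [] then (List.map PySem.Str.strip (a :: as)).getLast!
          else pvAFallback text (PySem.Str.splitlines text).reverse) = _
    rw [if_pos (by simp : (List.map PySem.Str.strip (a :: as)) ≠ [])]
    rw [List.getLast?_eq_some_getLast (by simp : (a :: as) ≠ [])]
    rw [List.map_cons, pvGetLast_bang]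
    exact List.getLast_map (f := PySem.Str.strip) (l := a :: as) (by simp)
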